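-- pv_equiv track=rewrite | github.com/Mrumz1k/Labs | 6/4.py | find_first_positive_and_last_negative
-- ===== SOURCE A (Python) =====
-- def find_first_positive_and_last_negative(arr):
--     first_positive = None
--     last_negative = None
--
--     for num in arr:
--         if first_positive is None and num > 0:
--             first_positive = num
--         if num < 0:
--             last_negative = num
--
--     return first_positive, last_negative
-- ===== SOURCE B (Python) =====
-- def find_first_positive_and_last_negative(arr):
--     arr = list(arr)
--     first_positive = next((x for x in arr if x > 0), None)
--     last_negative = next((x for x in reversed(arr) if x < 0), None)
--     return first_positive, last_negative
-- ===== Notes on version B (the rewrite author's own statement) =====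
-- stated objective: idiomatic
-- what changed: Replaces the single stateful forward loop with two independent searches: first positive via a forward next(), last negative via a next() over reversed(arr).
import Mathlib
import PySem

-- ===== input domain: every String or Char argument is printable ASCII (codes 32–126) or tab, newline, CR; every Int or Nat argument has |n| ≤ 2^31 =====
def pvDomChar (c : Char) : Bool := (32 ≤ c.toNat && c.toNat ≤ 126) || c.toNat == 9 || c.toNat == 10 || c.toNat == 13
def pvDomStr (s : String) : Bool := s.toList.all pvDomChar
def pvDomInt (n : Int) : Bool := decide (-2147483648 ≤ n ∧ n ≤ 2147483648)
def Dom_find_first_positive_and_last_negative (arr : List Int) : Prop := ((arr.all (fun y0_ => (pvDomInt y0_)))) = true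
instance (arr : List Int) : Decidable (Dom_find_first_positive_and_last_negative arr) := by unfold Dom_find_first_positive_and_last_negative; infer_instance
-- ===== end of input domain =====

-- B computes the same pair by two independent searches (forward for the first positive, over the reversed list for the last negative) instead of one stateful loop; objective: idiomatic.
-- ===== PORT A =====
def find_first_positive_and_last_negative (arr : List Int) : Option Int × Option Int :=
  arr.foldl
    (fun st num =>
      (if st.1 = none ∧ num > 0 then some num else st.1,
       if num < 0 then some num else st.2))
    (none, none)

-- ===== PORT B =====
def find_first_positive_and_last_negative_alt (arr : List Int) : Option Int × Option Int :=
  (arr.find? (fun x => x > 0), arr.reverse.find? (fun x => x < 0))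

-- ===== PRECONDITION & SPEC =====
def Spec_find_first_positive_and_last_negative (arr : List Int) (out : Option Int × Option Int) : Prop := out = find_first_positive_and_last_negative_alt arr
instance (arr : List Int) (out : Option Int × Option Int) : Decidable (Spec_find_first_positive_and_last_negative arr out) := by unfold Spec_find_first_positive_and_last_negative; infer_instance

-- ===== CLAIM (what is proved, stated in full; the proofs are below) =====
def Claim_equal_find_first_positive_and_last_negative : Prop := ∀ (arr : List Int), Dom_find_first_positive_and_last_negative arr → Spec_find_first_positive_and_last_negative arr (find_first_positive_and_last_negative arr)

-- ===== LEMMAS AND PROOFS =====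
theorem ffplnLoop (arr : List Int) (fp ln : Option Int) :
    arr.foldl
      (fun st num =>
        (if st.1 = none ∧ num > 0 then some num else st.1,
         if num < 0 then some num else st.2))
      (fp, ln)
    = ((fp.or (arr.find? (fun x => x > 0))),
       ((arr.reverse.find? (fun x => x < 0)).or ln)) := by
  induction arr generalizing fp ln with
  | nil => simp
  | cons a t ih =>
    simp only [List.foldl_cons, List.reverse_cons, List.find?_append, ih]
    cases fp with
    | none =>
      by_cases hpos : a > 0 <;> by_cases hneg : a < 0 <;>
        simp [List.find?, hpos, hneg, Option.or] <;>
        cases t.reverse.find? (fun x => decide (x < 0)) <;> simp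
    | some v =>
      by_cases hneg : a < 0 <;>
        simp [List.find?, hneg, Option.or] <;>
        cases t.reverse.find? (fun x => decide (x < 0)) <;> simp

-- ===== VERDICT (by name: the statement is the Claim_ definition above) =====
theorem find_first_positive_and_last_negative_spec : Claim_equal_find_first_positive_and_last_negative := by
  intro arr _
  unfold Spec_find_first_positive_and_last_negative
  unfold find_first_positive_and_last_negative find_first_positive_and_last_negative_alt
  rw [ffplnLoop]
  cases arr.reverse.find? (fun x => x < 0) <;> simp [Option.or]
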